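-- pv_equiv track=rewrite | github.com/TakayukiHirano117/interviewcat | maximum_frequency_difference/solution.py | most_frequent_diff
-- ===== SOURCE A (Python) =====
-- from typing import List
-- from collections import defaultdict
--
-- def most_frequent_diff(nums: List[int]) -> int:
--     freq_map = defaultdict(int)
--     most_frequent_diff_cnt = 0
--
--     for i in range(len(nums)-1):
--         # 隣り合う要素の差の絶対値を計算
--         diff = abs(nums[i+1] - nums[i])
--         freq_map[diff] += 1
--         # 出現頻度が現在の最頻値を上回ったら更新
--         most_frequent_diff_cnt = max(most_frequent_diff_cnt, freq_map[diff])
--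
--     return most_frequent_diff_cnt
-- ===== SOURCE B (Python) =====
-- def most_frequent_diff(nums):
--     # Sort the adjacent absolute differences; the answer is the length of the
--     # longest run of equal values in the sorted order (no hash map needed).
--     diffs = sorted(abs(b - a) for a, b in zip(nums, nums[1:]))
--     best = 0
--     run = 0
--     prev = None
--     for d in diffs:
--         run = run + 1 if prev == d else 1
--         best = max(best, run)
--         prev = d
--     return best
-- ===== Notes on version B (the rewrite author's own statement) =====
-- stated objective: alternative
-- what changed: Replaces A's hash-map frequency counting with a running maximum by a sort-then-scan algorithm: sort the adjacent absolute differences and return the length of the longest run of equal values in the sorted list; no frequency table is built.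
import Mathlib
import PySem

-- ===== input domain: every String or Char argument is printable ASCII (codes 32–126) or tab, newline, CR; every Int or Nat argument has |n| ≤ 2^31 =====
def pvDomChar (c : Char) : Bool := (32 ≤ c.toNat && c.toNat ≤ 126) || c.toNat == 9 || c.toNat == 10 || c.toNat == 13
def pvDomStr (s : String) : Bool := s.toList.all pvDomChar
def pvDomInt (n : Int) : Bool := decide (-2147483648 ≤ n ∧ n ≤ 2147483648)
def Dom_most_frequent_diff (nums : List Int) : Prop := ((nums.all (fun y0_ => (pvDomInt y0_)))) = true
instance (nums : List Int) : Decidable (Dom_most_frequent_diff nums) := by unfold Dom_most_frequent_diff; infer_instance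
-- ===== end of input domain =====

-- B replaces A's hash-map frequency counting with a running maximum by sort-then-scan:
-- sort the adjacent absolute differences and return the longest run of equal values.

-- ===== PORT A =====
-- for i in range(len(nums)-1): diff = abs(nums[i+1]-nums[i]); freq_map[diff] += 1; cnt = max(cnt, freq_map[diff])
-- (pyGetD is exact here: every index i and i+1 produced by the range is in bounds)
def most_frequent_diff (nums : List Int) : Int :=
  ((PySem.List.pyRange 0 ((nums.length : Int) - 1) 1).foldl
    (fun (st : PySem.Dict Int Int × Int) i =>
      let diff := |PySem.List.pyGetD nums (i + 1) 0 - PySem.List.pyGetD nums i 0|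
      let fm := st.1.modify diff 0 (· + 1)
      (fm, max st.2 (fm.getD diff 0)))
    (PySem.Dict.empty, 0)).2

-- ===== PORT B =====
-- diffs = sorted(abs(b - a) for a, b in zip(nums, nums[1:]));
-- best = run = 0; prev = None
-- for d in diffs: run = run + 1 if prev == d else 1; best = max(best, run); prev = d
def most_frequent_diff_alt (nums : List Int) : Int :=
  let diffs := PySem.List.sorted
    ((nums.zip (PySem.List.slice nums (some 1) none)).map (fun p => |p.2 - p.1|))
    (fun x => x) false
  (diffs.foldl
    (fun (st : Option Int × Int × Int) d =>
      let run := if st.1 = some d then st.2.1 + 1 else 1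
      (some d, run, max st.2.2 run))
    (none, 0, 0)).2.2

-- ===== PRECONDITION & SPEC =====
def Spec_most_frequent_diff (nums : List Int) (out : Int) : Prop := out = most_frequent_diff_alt nums
instance (nums : List Int) (out : Int) : Decidable (Spec_most_frequent_diff nums out) := by unfold Spec_most_frequent_diff; infer_instance

-- ===== CLAIM (what is proved, stated in full; the proofs are below) =====
def Claim_equal_most_frequent_diff : Prop := ∀ (nums : List Int), Dom_most_frequent_diff nums → Spec_most_frequent_diff nums (most_frequent_diff nums)

-- ===== LEMMAS AND PROOFS =====

-- the list of adjacent absolute differences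
def pvDiffs (xs : List Int) : List Int := (xs.zip xs.tail).map (fun p => |p.2 - p.1|)

-- A's loop body as a named step function over the diff value
def pvStepA (st : PySem.Dict Int Int × Int) (x : Int) : PySem.Dict Int Int × Int :=
  let fm := st.1.modify x 0 (· + 1)
  (fm, max st.2 (fm.getD x 0))

-- B's loop body as a named step function
def pvStepB (st : Option Int × Int × Int) (d : Int) : Option Int × Int × Int :=
  let run := if st.1 = some d then st.2.1 + 1 else 1
  (some d, run, max st.2.2 run)

-- A's index loop is the fold of pvStepA over the diffs list
lemma pv_fold_range_diffs {S : Type} (g : S → Int → S) :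
    ∀ (xs : List Int) (st : S),
      (List.range (xs.length - 1)).foldl
        (fun st k => g st |xs.getD (k + 1) 0 - xs.getD k 0|) st
      = (pvDiffs xs).foldl g st := by
  intro xs
  induction xs with
  | nil => intro st; simp [pvDiffs]
  | cons a t ih =>
    intro st
    cases t with
    | nil => simp [pvDiffs]
    | cons b t' =>
      have hlen : (a :: b :: t').length - 1 = ((b :: t').length - 1) + 1 := by simp
      rw [hlen, List.range_succ_eq_map, List.foldl_cons, List.foldl_map]
      have hih := ih (g st |b - a|)
      simp only [pvDiffs, List.tail_cons, List.zip_cons_cons, List.map_cons, List.foldl_cons] at hih ⊢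
      rw [← hih]
      rfl

lemma pvA_eq (nums : List Int) :
    most_frequent_diff nums = ((pvDiffs nums).foldl pvStepA (PySem.Dict.empty, 0)).2 := by
  unfold most_frequent_diff
  rw [PySem.List.pyRange_one, List.foldl_map]
  have hcast : (((nums.length : Int) - 1) - 0).toNat = nums.length - 1 := by omega
  rw [hcast]
  refine congrArg Prod.snd ?_
  rw [← pv_fold_range_diffs (g := pvStepA) nums (PySem.Dict.empty, 0)]
  apply PySem.List.foldl_congr_mem
  intro acc k _
  have h1 : ((k : Int) + 1) = (((k + 1 : Nat)) : Int) := by push_cast; ring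
  simp only [zero_add, h1, PySem.List.pyGetD_natCast]
  rfl

-- A's running max bounds the per-value counts and is attained by one of them
lemma pvFoldA_spec :
    ∀ (l : List Int) (d : PySem.Dict Int Int) (c : Int),
      c ≤ (l.foldl pvStepA (d, c)).2 ∧
      (∀ x ∈ l, d.getD x 0 + l.count x ≤ (l.foldl pvStepA (d, c)).2) ∧
      ((l.foldl pvStepA (d, c)).2 = c ∨
        ∃ x ∈ l, (l.foldl pvStepA (d, c)).2 ≤ d.getD x 0 + l.count x) := by
  intro l
  induction l with
  | nil => intro d c; simp
  | cons a t ih =>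
    intro d c
    have hstep : (a :: t).foldl pvStepA (d, c)
        = t.foldl pvStepA (d.modify a 0 (· + 1), max c (d.getD a 0 + 1)) := by
      simp only [List.foldl_cons, pvStepA, PySem.Dict.getD_modify_self]
    obtain ⟨ih1, ih2, ih3⟩ := ih (d.modify a 0 (· + 1)) (max c (d.getD a 0 + 1))
    rw [hstep]
    have hA : c ≤ max c (d.getD a 0 + 1) := le_max_left _ _
    have hB : d.getD a 0 + 1 ≤ max c (d.getD a 0 + 1) := le_max_right _ _
    have hgd : ∀ x : Int, (d.modify a 0 (· + 1)).getD x 0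
        = if x = a then d.getD a 0 + 1 else d.getD x 0 := by
      intro x; simp [PySem.Dict.getD_modify]
    have hcnt : ∀ x : Int, (a :: t).count x = t.count x + if a = x then 1 else 0 := by
      intro x; simp [List.count_cons]
    refine ⟨le_trans hA ih1, ?_, ?_⟩
    · intro x hx
      rw [hcnt x]
      by_cases hxa : x = a
      · subst hxa
        rw [if_pos rfl]
        by_cases hat : x ∈ t
        · have h := ih2 x hat
          rw [hgd x, if_pos rfl] at h
          omega
        · have h0 : t.count x = 0 := List.count_eq_zero_of_not_mem hat
          omega
      · rw [if_neg (Ne.symm hxa)]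
        have hxt : x ∈ t := by
          rcases List.mem_cons.mp hx with h | h
          · exact absurd h hxa
          · exact h
        have h := ih2 x hxt
        rw [hgd x, if_neg hxa] at h
        omega
    · rcases ih3 with h | ⟨x, hxt, hx⟩
      · rcases le_or_gt c (d.getD a 0 + 1) with hcle | hclt
        · right
          refine ⟨a, List.mem_cons_self, ?_⟩
          rw [hcnt a, if_pos rfl, h, max_eq_right hcle]
          omega
        · left
          rw [h]
          exact max_eq_left hclt.le
      · right
        refine ⟨x, List.mem_cons.mpr (Or.inr hxt), ?_⟩
        rw [hcnt x]
        rw [hgd x] at hx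
        by_cases hxa : x = a
        · rw [if_pos hxa] at hx
          rw [if_pos hxa.symm]
          subst hxa
          omega
        · rw [if_neg hxa] at hx
          rw [if_neg (Ne.symm hxa)]
          omega

-- B's sorted scan: with state (prev = some p, run r, best b), p ≤ all remaining
-- sorted elements and r ≤ b, the final best bounds all counts and is attained
lemma pvFoldB_spec :
    ∀ (s : List Int) (p r b : Int),
      s.Pairwise (· ≤ ·) → (∀ x ∈ s, p ≤ x) → r ≤ b →
      b ≤ (s.foldl pvStepB (some p, r, b)).2.2 ∧
      (∀ y ∈ s, y ≠ p → (s.count y : Int) ≤ (s.foldl pvStepB (some p, r, b)).2.2) ∧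
      ((s.count p : Int) + r ≤ (s.foldl pvStepB (some p, r, b)).2.2) ∧
      ((s.foldl pvStepB (some p, r, b)).2.2 = b ∨
        (s.foldl pvStepB (some p, r, b)).2.2 ≤ r + s.count p ∨
        ∃ y ∈ s, y ≠ p ∧ (s.foldl pvStepB (some p, r, b)).2.2 ≤ s.count y) := by
  intro s
  induction s with
  | nil => intro p r b _ _ hrb; simp; omega
  | cons x t ih =>
    intro p r b hsort hp hrb
    have hxt : ∀ z ∈ t, x ≤ z := fun z hz => (List.pairwise_cons.mp hsort).1 z hz
    have htsort : t.Pairwise (· ≤ ·) := (List.pairwise_cons.mp hsort).2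
    by_cases hxp : p = x
    · -- x = p : run extends
      subst hxp
      have hstep : (p :: t).foldl pvStepB (some p, r, b)
          = t.foldl pvStepB (some p, r + 1, max b (r + 1)) := by
        simp [pvStepB]
      obtain ⟨ih1, ih2, ih3, ih4⟩ := ih p (r + 1) (max b (r + 1)) htsort hxt (le_max_right _ _)
      rw [hstep]
      have hcp : (p :: t).count p = t.count p + 1 := by simp
      refine ⟨le_trans (le_max_left _ _) ih1, ?_, ?_, ?_⟩
      · intro y hy hyp
        have hyt : y ∈ t := by
          rcases List.mem_cons.mp hy with h | h
          · exact absurd h hyp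
          · exact h
        have := ih2 y hyt hyp
        have hcy : (p :: t).count y = t.count y := by
          simp [Ne.symm hyp]
        rw [hcy]; exact this
      · rw [hcp]; push_cast; omega
      · rcases ih4 with h | h | ⟨y, hy, hyp, hle⟩
        · rcases max_cases b (r + 1) with ⟨he, _⟩ | ⟨he, _⟩
          · left; rw [h, he]
          · right; left
            rw [h, he, hcp]
            have : (0 : Int) ≤ t.count p := Int.natCast_nonneg _
            push_cast; omega
        · right; left; rw [hcp]; push_cast; omega
        · right; right
          refine ⟨y, List.mem_cons.mpr (Or.inr hy), hyp, ?_⟩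
          have hcy : (p :: t).count y = t.count y := by
            simp [Ne.symm hyp]
          rw [hcy]; exact hle
    · -- x ≠ p : run resets to 1
      have hpx : p < x := lt_of_le_of_ne (hp x List.mem_cons_self) hxp
      have hstep : (x :: t).foldl pvStepB (some p, r, b)
          = t.foldl pvStepB (some x, 1, max b 1) := by
        have : ¬ ((some p : Option Int) = some x) := by simp [hxp]
        simp [pvStepB, this]
      obtain ⟨ih1, ih2, ih3, ih4⟩ := ih x 1 (max b 1) htsort hxt (le_max_right _ _)
      rw [hstep]
      have hpnott : p ∉ t := by
        intro hmem
        exact absurd (hxt p hmem) (not_le.mpr hpx)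
      have hxp' : x ≠ p := fun h => hxp h.symm
      have hcp0 : (x :: t).count p = 0 := by
        simp [hxp', List.count_eq_zero_of_not_mem hpnott]
      have hB := le_trans (le_max_left _ _) ih1
      refine ⟨hB, ?_, ?_, ?_⟩
      · intro y hy _
        by_cases hyx : y = x
        · subst hyx
          have hcy : (y :: t).count y = t.count y + 1 := by simp
          rw [hcy]; push_cast; omega
        · have hyt : y ∈ t := by
            rcases List.mem_cons.mp hy with h | h
            · exact absurd h hyx
            · exact h
          have := ih2 y hyt hyx
          have hcy : (x :: t).count y = t.count y := by
            simp [Ne.symm hyx]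
          rw [hcy]; exact this
      · rw [hcp0]; simp; omega
      · rcases ih4 with h | h | ⟨y, hy, hyx, hle⟩
        · rcases max_cases b 1 with ⟨he, hge⟩ | ⟨he, hlt⟩
          · left; rw [h, he]
          · right; right
            refine ⟨x, List.mem_cons_self, Ne.symm hxp, ?_⟩
            have hx1 : (1 : Int) ≤ ((x :: t).count x : Int) := by
              have : 0 < (x :: t).count x := List.count_pos_iff.mpr List.mem_cons_self
              exact_mod_cast this
            rw [h, he]; exact hx1
        · right; right
          refine ⟨x, List.mem_cons_self, Ne.symm hxp, ?_⟩
          have hcx : (x :: t).count x = t.count x + 1 := by simp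
          rw [hcx]; push_cast; omega
        · right; right
          refine ⟨y, List.mem_cons.mpr (Or.inr hy), ?_, ?_⟩
          · intro hyp
            exact absurd (hxt y hy) (not_le.mpr (hyp ▸ hpx))
          · have hcy : (x :: t).count y = t.count y := by
              simp [Ne.symm hyx]
            rw [hcy]; exact hle

-- B's value is the scan of pvStepB over the sorted diffs list
lemma pvB_eq (nums : List Int) :
    most_frequent_diff_alt nums
      = ((PySem.List.sorted (pvDiffs nums) (fun x => x) false).foldl
          pvStepB (none, 0, 0)).2.2 := by
  unfold most_frequent_diff_alt
  rw [PySem.List.slice_from_one]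
  rfl

-- the sorted scan computes: 0 on [], else a value ≥ every count and equal to some count
lemma pvB_fold_cons (x : Int) (t : List Int) :
    (x :: t).foldl pvStepB (none, 0, 0) = t.foldl pvStepB (some x, 1, 1) := by
  simp [pvStepB]

lemma pvB_char (l : List Int) :
    ∀ y ∈ l, (l.count y : Int)
        ≤ ((PySem.List.sorted l (fun x => x) false).foldl pvStepB (none, 0, 0)).2.2 := by
  intro y hy
  cases hs : PySem.List.sorted l (fun x => x) false with
  | nil =>
    exact absurd ((PySem.List.sorted_eq_nil_iff _ _ _).mp hs ▸ hy) List.not_mem_nil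
  | cons x t =>
    have hperm : (x :: t).Perm l := hs ▸ PySem.List.sorted_perm l (fun x => x) false
    have hpw : (x :: t).Pairwise (· ≤ ·) := by
      have := PySem.List.sorted_pairwise l (fun x => x)
      rw [hs] at this
      exact this
    have hxt : ∀ z ∈ t, x ≤ z := fun z hz => (List.pairwise_cons.mp hpw).1 z hz
    obtain ⟨_, h2, h3, _⟩ :=
      pvFoldB_spec t x 1 1 (List.pairwise_cons.mp hpw).2 hxt le_rfl
    have hcy : l.count y = (x :: t).count y := (hperm.count_eq y).symm
    rw [pvB_fold_cons, hcy]
    by_cases hyx : y = x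
    · subst hyx
      have : (y :: t).count y = t.count y + 1 := by simp
      rw [this]; push_cast; omega
    · have hyt : y ∈ t := by
        have := hperm.mem_iff.mpr hy
        rcases List.mem_cons.mp this with h | h
        · exact absurd h hyx
        · exact h
      have hc : (x :: t).count y = t.count y := by
        simp [Ne.symm hyx]
      rw [hc]
      exact h2 y hyt hyx

lemma pvB_attained (l : List Int) (hne : l ≠ []) :
    ∃ y ∈ l, ((PySem.List.sorted l (fun x => x) false).foldl pvStepB (none, 0, 0)).2.2
        ≤ (l.count y : Int) := by
  cases hs : PySem.List.sorted l (fun x => x) false with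
  | nil =>
    exact absurd ((PySem.List.sorted_eq_nil_iff _ _ _).mp hs) hne
  | cons x t =>
    have hperm : (x :: t).Perm l := hs ▸ PySem.List.sorted_perm l (fun x => x) false
    have hpw : (x :: t).Pairwise (· ≤ ·) := by
      have := PySem.List.sorted_pairwise l (fun x => x)
      rw [hs] at this
      exact this
    have hxt : ∀ z ∈ t, x ≤ z := fun z hz => (List.pairwise_cons.mp hpw).1 z hz
    obtain ⟨_, _, _, h4⟩ :=
      pvFoldB_spec t x 1 1 (List.pairwise_cons.mp hpw).2 hxt le_rfl
    rw [pvB_fold_cons]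
    have hcx : ((x :: t).count x : Int) = (t.count x : Int) + 1 := by
      simp
    have hxl : x ∈ l := hperm.mem_iff.mp List.mem_cons_self
    have hclx : (l.count x : Int) = ((x :: t).count x : Int) := by
      exact_mod_cast (hperm.count_eq x).symm
    rcases h4 with h | h | ⟨y, hy, hyx, hle⟩
    · refine ⟨x, hxl, ?_⟩
      rw [hclx, hcx, h]
      have : (0 : Int) ≤ (t.count x : Int) := Int.natCast_nonneg _
      omega
    · refine ⟨x, hxl, ?_⟩
      rw [hclx, hcx]
      omega
    · refine ⟨y, hperm.mem_iff.mp (List.mem_cons.mpr (Or.inr hy)), ?_⟩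
      have hcly : (l.count y : Int) = ((x :: t).count y : Int) := by
        exact_mod_cast (hperm.count_eq y).symm
      have hc : (x :: t).count y = t.count y := by
        simp [Ne.symm hyx]
      rw [hcly, hc]
      exact hle

-- ===== VERDICT (by name: the statement is the Claim_ definition above) =====
theorem most_frequent_diff_spec : Claim_equal_most_frequent_diff := by
  intro nums _
  unfold Spec_most_frequent_diff
  rw [pvA_eq, pvB_eq]
  obtain ⟨h1, h2, h3⟩ := pvFoldA_spec (pvDiffs nums) PySem.Dict.empty 0
  have hempty : ∀ x : Int, (PySem.Dict.empty : PySem.Dict Int Int).getD x 0 = 0 := fun _ => rfl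
  by_cases hnil : pvDiffs nums = []
  · rw [hnil]
    rw [hnil] at h3
    rcases h3 with h | ⟨x, hx, _⟩
    · rw [h]; rfl
    · exact absurd hx (List.not_mem_nil)
  · have hA_le : ∀ x ∈ pvDiffs nums, ((pvDiffs nums).count x : Int)
        ≤ ((pvDiffs nums).foldl pvStepA (PySem.Dict.empty, 0)).2 := by
      intro x hx
      have := h2 x hx
      rw [hempty x] at this
      omega
    obtain ⟨x0, hx0⟩ := List.exists_mem_of_ne_nil _ hnil
    have hApos : (1 : Int) ≤ ((pvDiffs nums).foldl pvStepA (PySem.Dict.empty, 0)).2 := by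
      have hc : 0 < (pvDiffs nums).count x0 := List.count_pos_iff.mpr hx0
      have := hA_le x0 hx0
      omega
    obtain ⟨yB, hyB, hBle⟩ := pvB_attained (pvDiffs nums) hnil
    have hB_le := pvB_char (pvDiffs nums)
    apply le_antisymm
    · -- A ≤ B
      rcases h3 with h | ⟨x, hx, hle⟩
      · omega
      · rw [hempty x] at hle
        have := hB_le x hx
        omega
    · -- B ≤ A
      exact le_trans hBle (hA_le yB hyB)
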